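-- pv_equiv track=rewrite | github.com/pmdasilva/DesafioDominandoeExtraindoDadosComPython | Desafios/D001-filtragem_de_visuais.py | filtrar_visuais
-- ===== SOURCE A (Python) =====
-- def filtrar_visuais(lista_visuais):
--     # Converter a string de entrada em uma lista
--     visuais = lista_visuais.split(", ")
--
--     # Normalize e remova duplicatas usando um conjunto
--     # lista_normalizada = set(visual.lower() for visual in visuais) #Essa é a forma comprimida
--     lista_normalizada = set()
--     for visual in visuais:
--         lista_normalizada.add(visual.lower())
--
--     # Converta o conjunto de volta para uma lista ordenada:
--     #lista_final = [visual.title() for visual in sorted(lista_normalizada)] #Essa é a forma comprimida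
--     lista_final = []
--     for visual in sorted(lista_normalizada):
--         lista_final.append(visual.title())
--
--     # Unir a lista em uma string, separada por vírgulas
--     return ", ".join(lista_final)
-- ===== SOURCE B (Python) =====
-- def filtrar_visuais(lista_visuais):
--     tokens = sorted(v.lower() for v in lista_visuais.split(", "))
--     resultado = []
--     anterior = None
--     for t in tokens:
--         if t != anterior:
--             resultado.append(t.title())
--             anterior = t
--     return ", ".join(resultado)
-- ===== Notes on version B (the rewrite author's own statement) =====
-- stated objective: alternative
-- what changed: Replaces the membership set with sort-then-adjacent-dedup: tokens are lowercased and sorted first, then a single pass with a last-seen sentinel keeps each token once, so dedup depends on the prior sort instead of a set.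
import Mathlib
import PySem

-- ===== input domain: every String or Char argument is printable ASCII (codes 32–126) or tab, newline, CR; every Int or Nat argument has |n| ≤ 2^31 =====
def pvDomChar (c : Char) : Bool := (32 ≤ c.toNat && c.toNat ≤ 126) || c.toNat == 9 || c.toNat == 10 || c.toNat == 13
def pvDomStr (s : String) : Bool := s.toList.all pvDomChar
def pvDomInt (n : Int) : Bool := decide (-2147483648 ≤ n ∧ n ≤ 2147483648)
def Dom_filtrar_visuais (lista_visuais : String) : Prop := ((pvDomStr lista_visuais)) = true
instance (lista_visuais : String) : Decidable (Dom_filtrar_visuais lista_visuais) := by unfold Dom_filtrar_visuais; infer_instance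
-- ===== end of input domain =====

-- B replaces A's membership set by sort-then-adjacent-dedup with a last-seen sentinel (alternative decomposition, same cost).


-- shared helper: hand port of str.title(), exact on ASCII (cased = alphabetic there);
-- the Bool argument is "previous character was cased"
def pyTitleChars : Bool → List Char → List Char
  | _, [] => []
  | p, c :: t =>
      let cased := PySem.Chars.isalpha c
      (if cased then (if p then PySem.Chars.lowerChar c else PySem.Chars.upperChar c) else c)
        :: pyTitleChars cased t

def pyTitle (s : String) : String := String.ofList (pyTitleChars false s.toList)

-- s.split(sep) for nonempty sep, via PySem.Chars.splitOn (exact for sep ≠ "")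
def pySplit (s sep : String) : List String :=
  (PySem.Chars.splitOn s.toList sep.toList).map String.ofList

-- ===== PORT A =====
def filtrar_visuais (lista_visuais : String) : String :=
  let visuais := pySplit lista_visuais ", "
  let lista_normalizada :=
    visuais.foldl (fun s visual => PySem.Set.add s (PySem.Str.lower visual)) PySem.Set.empty
  let lista_final :=
    (PySem.List.sorted lista_normalizada (fun x => x) false).foldl
      (fun acc visual => acc ++ [pyTitle visual]) []
  PySem.Str.join ", " lista_final

-- ===== PORT B =====
def altGo (anterior : Option String) (resultado : List String) : List String → List String
  | [] => resultado
  | t :: rest =>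
      if some t = anterior then altGo anterior resultado rest
      else altGo (some t) (resultado ++ [pyTitle t]) rest

def filtrar_visuais_alt (lista_visuais : String) : String :=
  let tokens :=
    PySem.List.sorted ((pySplit lista_visuais ", ").map
      (fun v => PySem.Str.lower v)) (fun x => x) false
  PySem.Str.join ", " (altGo none [] tokens)

-- ===== PRECONDITION & SPEC =====
def Spec_filtrar_visuais (lista_visuais : String) (out : String) : Prop := out = filtrar_visuais_alt lista_visuais
instance (lista_visuais : String) (out : String) : Decidable (Spec_filtrar_visuais lista_visuais out) := by unfold Spec_filtrar_visuais; infer_instance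

-- ===== CLAIM (what is proved, stated in full; the proofs are below) =====
def Claim_equal_filtrar_visuais : Prop := ∀ (lista_visuais : String), Dom_filtrar_visuais lista_visuais → Spec_filtrar_visuais lista_visuais (filtrar_visuais lista_visuais)

-- ===== LEMMAS AND PROOFS =====

-- pure shape of B's loop: adjacent dedup (before the title-casing)
def dedupAdj : Option String → List String → List String
  | _, [] => []
  | prev, t :: rest =>
      if some t = prev then dedupAdj prev rest
      else t :: dedupAdj (some t) rest

theorem altGo_eq (l : List String) : ∀ (prev : Option String) (acc : List String),
    altGo prev acc l = acc ++ (dedupAdj prev l).map pyTitle := by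
  induction l with
  | nil => intro prev acc; simp [altGo, dedupAdj]
  | cons t rest ih =>
      intro prev acc
      by_cases h : some t = prev
      · simp [altGo, dedupAdj, h, ih]
      · simp [altGo, dedupAdj, h, ih]

theorem mem_dedupAdj (l : List String) : ∀ (prev : Option String),
    l.Pairwise (· ≤ ·) → (∀ p, prev = some p → ∀ y ∈ l, p ≤ y) →
    ∀ x, x ∈ dedupAdj prev l ↔ (x ∈ l ∧ prev ≠ some x) := by
  induction l with
  | nil => intro prev _ _ x; simp [dedupAdj]
  | cons t rest ih =>
      intro prev hs hp x
      have h1 : ∀ y ∈ rest, t ≤ y := (List.pairwise_cons.mp hs).1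
      have h2 : rest.Pairwise (· ≤ ·) := (List.pairwise_cons.mp hs).2
      by_cases h : some t = prev
      · have := ih prev h2 (fun p hp' y hy => hp p hp' y (List.mem_cons_of_mem _ hy)) x
        simp only [dedupAdj, if_pos h, this, List.mem_cons]
        constructor
        · rintro ⟨hx, hne⟩; exact ⟨Or.inr hx, hne⟩
        · rintro ⟨hx | hx, hne⟩
          · subst hx; exact absurd h.symm hne
          · exact ⟨hx, hne⟩
      · have ihr := ih (some t) h2 (by rintro p ⟨rfl⟩ y hy; exact h1 y hy) x
        simp only [dedupAdj, if_neg h, List.mem_cons, ihr]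
        constructor
        · rintro (rfl | ⟨hx, hne⟩)
          · exact ⟨Or.inl rfl, fun hc => h hc.symm⟩
          · refine ⟨Or.inr hx, ?_⟩
            rintro rfl
            have hxt : t ≤ x := h1 x hx
            have htx : x ≤ t := hp x rfl t (List.mem_cons_self)
            have : some x = some t := by rw [le_antisymm htx hxt]
            exact hne this.symm
        · rintro ⟨rfl | hx, hne⟩
          · exact Or.inl rfl
          · by_cases hxt : x = t
            · exact Or.inl hxt
            · exact Or.inr ⟨hx, by simpa using Ne.symm hxt⟩

theorem pairwise_dedupAdj (l : List String) : ∀ (prev : Option String),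
    l.Pairwise (· ≤ ·) → (∀ p, prev = some p → ∀ y ∈ l, p ≤ y) →
    (dedupAdj prev l).Pairwise (· < ·) := by
  induction l with
  | nil => intro prev _ _; simp [dedupAdj]
  | cons t rest ih =>
      intro prev hs hp
      have h1 : ∀ y ∈ rest, t ≤ y := (List.pairwise_cons.mp hs).1
      have h2 : rest.Pairwise (· ≤ ·) := (List.pairwise_cons.mp hs).2
      by_cases h : some t = prev
      · simpa [dedupAdj, if_pos h] using
          ih prev h2 (fun p hp' y hy => hp p hp' y (List.mem_cons_of_mem _ hy))
      · simp only [dedupAdj, if_neg h, List.pairwise_cons]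
        refine ⟨?_, ih (some t) h2 (by rintro p ⟨rfl⟩ y hy; exact h1 y hy)⟩
        intro y hy
        have := mem_dedupAdj rest (some t) h2 (by rintro p ⟨rfl⟩ z hz; exact h1 z hz)
        have hmy := (this y).mp hy
        exact lt_of_le_of_ne (h1 y hmy.1) (by intro hc; exact hmy.2 (by rw [hc]))

theorem foldl_append_map (f : String → String) (l : List String) :
    ∀ acc, l.foldl (fun a v => a ++ [f v]) acc = acc ++ l.map f := by
  induction l with
  | nil => intro acc; simp
  | cons t rest ih => intro acc; simp [ih]

theorem dedupAdj_sorted (ys : List String) :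
    dedupAdj none (PySem.List.sorted ys (fun x => x) false)
      = PySem.List.sorted (PySem.Set.ofList ys) (fun x => x) false := by
  have hchain : (PySem.List.sorted ys (fun x => x) false).Pairwise (· ≤ ·) :=
    PySem.List.sorted_pairwise ys (fun x => x)
  have hmem := mem_dedupAdj (PySem.List.sorted ys (fun x => x) false) none hchain (by simp)
  have hpw := pairwise_dedupAdj (PySem.List.sorted ys (fun x => x) false) none hchain (by simp)
  have hnd : (dedupAdj none (PySem.List.sorted ys (fun x => x) false)).Nodup :=
    hpw.imp (fun h => ne_of_lt h)
  have hperm : (dedupAdj none (PySem.List.sorted ys (fun x => x) false)).Perm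
      (PySem.Set.ofList ys) := by
    rw [List.perm_ext_iff_of_nodup hnd (PySem.Set.nodup_ofList ys)]
    intro a
    rw [hmem a, PySem.Set.mem_ofList, PySem.List.mem_sorted]
    simp
  exact (PySem.List.sorted_eq_of_perm_of_pairwise_lt _ _ _ hperm hpw).symm

-- ===== VERDICT (by name: the statement is the Claim_ definition above) =====
theorem filtrar_visuais_spec : Claim_equal_filtrar_visuais := by
  intro s _
  unfold Spec_filtrar_visuais filtrar_visuais filtrar_visuais_alt
  dsimp only
  rw [← PySem.Set.update_map_eq_foldl_add]
  simp only [PySem.Set.empty, PySem.Set.update_nil_left]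
  rw [foldl_append_map, altGo_eq, dedupAdj_sorted]
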